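-- pv_equiv track=rewrite | github.com/QuisVenator/advent-of-code-2024 | day7.py | calc
-- ===== SOURCE A (Python) =====
-- def calc(nums, i, res):
--     if i == len(nums):
--         return res == nums[0]
--     if i > len(nums):
--         # Shoudn't happen
--         return False
--     if res > nums[0]:
--         return False
--
--     if calc(nums, i+1, res+nums[i]):
--         return True
--     return calc(nums, i+1, res*nums[i])
-- ===== SOURCE B (Python) =====
-- def calc(nums, i, res):
--     if i == len(nums):
--         return res == nums[0]
--     if i > len(nums):
--         return False
--     target = nums[0]
--     if res > target:
--         return False
--     frontier = {res}
--     for k in range(i, len(nums) - 1):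
--         frontier = {w for v in frontier for w in (v + nums[k], v * nums[k]) if w <= target}
--     return any(v + nums[-1] == target or v * nums[-1] == target for v in frontier)
-- ===== Notes on version B (the rewrite author's own statement) =====
-- stated objective: alternative
-- what changed: Replaced A's two-branch recursion with an iterative breadth-first frontier SET of reachable partial results (pruned at > target exactly where A prunes, duplicates collapsed), finishing with a direct equality check against the last operand.
import Mathlib
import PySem

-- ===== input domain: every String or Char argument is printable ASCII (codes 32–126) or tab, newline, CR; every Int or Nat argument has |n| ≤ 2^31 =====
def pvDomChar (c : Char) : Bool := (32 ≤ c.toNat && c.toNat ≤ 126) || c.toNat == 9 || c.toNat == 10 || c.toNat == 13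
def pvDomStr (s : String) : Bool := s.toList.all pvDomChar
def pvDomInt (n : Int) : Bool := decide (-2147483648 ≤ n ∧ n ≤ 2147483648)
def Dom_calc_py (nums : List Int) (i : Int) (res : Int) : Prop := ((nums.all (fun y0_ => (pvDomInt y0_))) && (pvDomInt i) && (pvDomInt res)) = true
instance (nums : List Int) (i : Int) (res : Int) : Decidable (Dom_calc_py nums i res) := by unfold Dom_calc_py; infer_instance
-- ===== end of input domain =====

-- B replaces A's two-way recursion by an iterative breadth-first frontier SET of reachable
-- partial results (duplicates collapse), pruned at > target exactly where A prunes.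

-- ===== PORT A =====
-- literal transliteration of A's recursion; pyGet? `none` = IndexError, excluded by Pre_
def calc_py (nums : List Int) (i : Int) (res : Int) : Bool :=
  if i = (nums.length : Int) then
    match PySem.List.pyGet? nums 0 with
    | some t => decide (res = t)
    | none => false        -- IndexError on nums[0]
  else if (nums.length : Int) < i then
    false
  else
    match PySem.List.pyGet? nums 0 with
    | none => false        -- IndexError on nums[0]
    | some t =>
      if t < res then false
      else
        match PySem.List.pyGet? nums i with
        | none => false    -- IndexError on nums[i]
        | some x =>
          if calc_py nums (i + 1) (res + x) then true
          else calc_py nums (i + 1) (res * x)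
termination_by ((nums.length : Int) + 1 - i).toNat
decreasing_by all_goals omega

-- ===== PORT B =====
def calc_py_alt (nums : List Int) (i : Int) (res : Int) : Bool :=
  if i = (nums.length : Int) then
    match PySem.List.pyGet? nums 0 with
    | some t => decide (res = t)
    | none => false        -- IndexError on nums[0]
  else if (nums.length : Int) < i then
    false
  else
    match PySem.List.pyGet? nums 0 with
    | none => false        -- IndexError on nums[0]
    | some target =>
      if target < res then false
      else
      -- frontier = {res}
      -- for k in range(i, len(nums)-1): frontier = {w for v in frontier for w in (v+nums[k], v*nums[k]) if w <= target}
      let frontier : PySem.Set Int :=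
        (PySem.List.pyRange i ((nums.length : Int) - 1)).foldl
          (fun fr k =>
            fr.foldl
              (fun acc v =>
                match PySem.List.pyGet? nums k with
                | none => acc    -- IndexError on nums[k]; excluded by Pre_
                | some x =>
                  let acc1 := if v + x ≤ target then PySem.Set.add acc (v + x) else acc
                  if v * x ≤ target then PySem.Set.add acc1 (v * x) else acc1)
              (PySem.Set.ofList []))
          (PySem.Set.ofList [res])
      -- any(v + nums[-1] == target or v * nums[-1] == target for v in frontier)
      frontier.any (fun v =>
        match PySem.List.pyGet? nums (-1) with
        | none => false
        | some last => decide (v + last = target) || decide (v * last = target))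

-- ===== PRECONDITION & SPEC =====
-- Pre_ excludes exactly the inputs where the Python A RAISES IndexError (empty nums reaching
-- nums[0], or i < -len(nums) reaching nums[i]); B raises there too, so nothing returned is hidden.
def Pre_calc_py (nums : List Int) (i : Int) (res : Int) : Prop :=
  (nums = [] ∧ 0 < i) ∨ (nums ≠ [] ∧ (-(nums.length : Int) ≤ i ∨ nums.headI < res))
instance (nums : List Int) (i : Int) (res : Int) : Decidable (Pre_calc_py nums i res) := by
  unfold Pre_calc_py; infer_instance

def pvWitness_calc_py : List Int × Int × Int := ([3, 1, 2], 1, 1)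

def Spec_calc_py (nums : List Int) (i : Int) (res : Int) (out : Bool) : Prop := out = calc_py_alt nums i res
instance (nums : List Int) (i : Int) (res : Int) (out : Bool) : Decidable (Spec_calc_py nums i res out) := by unfold Spec_calc_py; infer_instance

-- ===== CLAIM (what is proved, stated in full; the proofs are below) =====
def Claim_equal_calc_py : Prop := ∀ (nums : List Int) (i : Int) (res : Int), Dom_calc_py nums i res → Pre_calc_py nums i res → Spec_calc_py nums i res (calc_py nums i res)

-- ===== LEMMAS AND PROOFS =====

-- the operand nums[k] (total form; used only where k is in range)
def getOp (nums : List Int) (k : Int) : Int := (PySem.List.pyGet? nums k).getD 0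

-- reference evaluator: A's recursion phrased over the explicit operand list
def fOps (t : Int) : List Int → Int → Bool
  | [], r => decide (r = t)
  | x :: xs, r => if t < r then false else (fOps t xs (r + x) || fOps t xs (r * x))

-- one pruned expansion step of B's frontier
def stepF (t x : Int) (S : PySem.Set Int) : PySem.Set Int :=
  S.foldl
    (fun acc v =>
      let acc1 := if v + x ≤ t then PySem.Set.add acc (v + x) else acc
      if v * x ≤ t then PySem.Set.add acc1 (v * x) else acc1)
    (PySem.Set.ofList [])

theorem pyGet?_eq_some_getOp (nums : List Int) (k : Int) (h0 : -(nums.length : Int) ≤ k)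
    (h1 : k < (nums.length : Int)) : PySem.List.pyGet? nums k = some (getOp nums k) := by
  cases h : PySem.List.pyGet? nums k with
  | none =>
    rw [PySem.List.pyGet?_eq_none_iff] at h
    exact absurd ⟨h0, h1⟩ h
  | some x => simp [getOp, h]

theorem fOps_of_gt (t r x : Int) (xs : List Int) (h : t < r) : fOps t (x :: xs) r = false := by
  simp [fOps, h]

theorem fOps_le (t r : Int) (y : Int) (ys : List Int) (h : fOps t (y :: ys) r = true) : r ≤ t := by
  by_contra hc
  rw [fOps_of_gt t r y ys (by omega)] at h
  exact Bool.false_ne_true h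

theorem mem_stepF_body (t x v w : Int) (acc : PySem.Set Int) :
    (w ∈ (let acc1 := if v + x ≤ t then PySem.Set.add acc (v + x) else acc;
          if v * x ≤ t then PySem.Set.add acc1 (v * x) else acc1)) ↔
      w ∈ acc ∨ ((w = v + x ∧ v + x ≤ t) ∨ (w = v * x ∧ v * x ≤ t)) := by
  by_cases h1 : v + x ≤ t <;> by_cases h2 : v * x ≤ t <;>
    simp only [h1, h2, if_true, if_false, PySem.Set.mem_add] <;> tauto

theorem mem_stepF_fold (t x : Int) (l : List Int) :
    ∀ (acc : PySem.Set Int) (w : Int),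
      (w ∈ l.foldl
        (fun acc v =>
          let acc1 := if v + x ≤ t then PySem.Set.add acc (v + x) else acc
          if v * x ≤ t then PySem.Set.add acc1 (v * x) else acc1) acc) ↔
      (w ∈ acc ∨ ∃ v ∈ l, (w = v + x ∧ v + x ≤ t) ∨ (w = v * x ∧ v * x ≤ t)) := by
  induction l with
  | nil => intro acc w; simp
  | cons v l ih =>
    intro acc w
    rw [List.foldl_cons, ih, mem_stepF_body, List.exists_mem_cons_iff]
    exact or_assoc

theorem mem_stepF (t x : Int) (S : PySem.Set Int) (w : Int) :
    w ∈ stepF t x S ↔ ∃ v ∈ S, (w = v + x ∧ v + x ≤ t) ∨ (w = v * x ∧ v * x ≤ t) := by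
  unfold stepF
  rw [mem_stepF_fold]
  simp [PySem.Set.ofList]

theorem le_of_mem_stepF (t x : Int) (S : PySem.Set Int) (w : Int) (h : w ∈ stepF t x S) : w ≤ t := by
  rw [mem_stepF] at h
  obtain ⟨v, _, hor⟩ := h
  rcases hor with ⟨rfl, h⟩ | ⟨rfl, h⟩ <;> exact h

-- B's frontier fold computes "some seed reaches t through the operands", A-style
theorem frontier_any (t last : Int) (xs : List Int) :
    ∀ (S : PySem.Set Int), (∀ v ∈ S, v ≤ t) →
      ((xs.foldl (fun fr x => stepF t x fr) S).any
        (fun v => decide (v + last = t) || decide (v * last = t)))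
      = S.any (fun v => fOps t (xs ++ [last]) v) := by
  induction xs with
  | nil =>
    intro S hS
    rw [Bool.eq_iff_iff]
    simp only [List.foldl_nil, List.any_eq_true, List.nil_append]
    constructor
    · rintro ⟨v, hv, hp⟩
      refine ⟨v, hv, ?_⟩
      simp only [fOps]
      have := hS v hv
      simp only [show ¬ t < v by omega, if_false]
      simpa using hp
    · rintro ⟨v, hv, hp⟩
      refine ⟨v, hv, ?_⟩
      simp only [fOps] at hp
      have := hS v hv
      simp only [show ¬ t < v by omega, if_false] at hp
      simpa using hp
  | cons x xs ih =>
    intro S hS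
    rw [List.foldl_cons, ih (stepF t x S) (fun v hv => le_of_mem_stepF t x S v hv)]
    rw [Bool.eq_iff_iff]
    simp only [List.any_eq_true]
    constructor
    · rintro ⟨w, hw, hp⟩
      rw [mem_stepF] at hw
      obtain ⟨v, hv, hor⟩ := hw
      refine ⟨v, hv, ?_⟩
      have hvt := hS v hv
      simp only [List.cons_append, fOps, show ¬ t < v by omega, if_false, Bool.or_eq_true]
      rcases hor with ⟨rfl, _⟩ | ⟨rfl, _⟩
      · left; exact hp
      · right; exact hp
    · rintro ⟨v, hv, hp⟩
      have hvt := hS v hv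
      simp only [List.cons_append, fOps, show ¬ t < v by omega, if_false, Bool.or_eq_true] at hp
      rcases hp with hp | hp
      · have hle : v + x ≤ t := by
          cases hxs : xs ++ [last] with
          | nil => exact absurd hxs (by simp)
          | cons y ys => exact fOps_le t (v + x) y ys (by rwa [hxs] at hp)
        exact ⟨v + x, (mem_stepF t x S _).mpr ⟨v, hv, Or.inl ⟨rfl, hle⟩⟩, hp⟩
      · have hle : v * x ≤ t := by
          cases hxs : xs ++ [last] with
          | nil => exact absurd hxs (by simp)
          | cons y ys => exact fOps_le t (v * x) y ys (by rwa [hxs] at hp)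
        exact ⟨v * x, (mem_stepF t x S _).mpr ⟨v, hv, Or.inr ⟨rfl, hle⟩⟩, hp⟩

-- A's recursion equals the reference evaluator on the operand list nums[i:], with wraparound
theorem calcA_eq_fOps (nums : List Int) (hn : nums ≠ []) :
    ∀ (n : Nat) (i res : Int), -(nums.length : Int) ≤ i → i ≤ (nums.length : Int) →
      ((nums.length : Int) - i).toNat = n →
      calc_py nums i res
        = fOps nums.headI ((PySem.List.pyRange i (nums.length : Int)).map (getOp nums)) res := by
  have h0 : PySem.List.pyGet? nums 0 = some nums.headI := by
    cases nums with
    | nil => exact absurd rfl hn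
    | cons a l => simp [List.headI]
  intro n
  induction n with
  | zero =>
    intro i res hlo hhi hcnt
    have hi : i = (nums.length : Int) := by omega
    rw [PySem.List.pyRange_one_eq_nil (by omega)]
    unfold calc_py
    simp [hi, h0, fOps]
  | succ n ih =>
    intro i res hlo hhi hcnt
    have hi : i < (nums.length : Int) := by omega
    rw [PySem.List.pyRange_one_cons hi, List.map_cons]
    unfold calc_py
    rw [if_neg (by omega), if_neg (by omega), h0,
      pyGet?_eq_some_getOp nums i hlo hi]
    dsimp only
    by_cases hr : nums.headI < res
    · simp [fOps, hr]
    · rw [if_neg hr]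
      rw [ih (i + 1) (res + getOp nums i) (by omega) (by omega) (by omega),
        ih (i + 1) (res * getOp nums i) (by omega) (by omega) (by omega)]
      simp only [fOps, if_neg hr]
      cases fOps nums.headI ((PySem.List.pyRange (i + 1) (nums.length : Int)).map (getOp nums)) (res + getOp nums i) <;> simp

-- ===== VERDICT (by name: the statement is the Claim_ definition above) =====
theorem calc_py_spec : Claim_equal_calc_py := by
  intro nums i res _ hpre
  unfold Spec_calc_py
  by_cases hi : i = (nums.length : Int)
  · unfold calc_py calc_py_alt
    simp [hi]
  · by_cases hgt : (nums.length : Int) < i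
    · unfold calc_py calc_py_alt
      rw [if_neg hi, if_neg hi, if_pos hgt, if_pos hgt]
    · -- i < len(nums); Pre_ forces nums ≠ []
      have hlt : i < (nums.length : Int) := by omega
      have hn : nums ≠ [] := by
        rintro rfl
        simp at hlt
        rcases hpre with ⟨_, h⟩ | ⟨h, _⟩
        · omega
        · exact h rfl
      have h0 : PySem.List.pyGet? nums 0 = some nums.headI := by
        cases nums with
        | nil => exact absurd rfl hn
        | cons a l => simp [List.headI]
      by_cases hr : nums.headI < res
      · -- both sides prune immediately to false
        conv_lhs => unfold calc_py
        conv_rhs => unfold calc_py_alt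
        rw [if_neg hi, if_neg hi, if_neg hgt, if_neg hgt, h0]
        dsimp only
        rw [if_pos hr, if_pos hr]
      · -- res ≤ target: Pre_ gives -len ≤ i; both sides equal the reference evaluator
        have hlo : -(nums.length : Int) ≤ i := by
          rcases hpre with ⟨h, _⟩ | ⟨_, h | h⟩
          · exact absurd h hn
          · exact h
          · omega
        -- rewrite A
        rw [calcA_eq_fOps nums hn (((nums.length : Int) - i).toNat) i res hlo (by omega) rfl]
        -- rewrite B
        conv_rhs => unfold calc_py_alt
        rw [if_neg hi, if_neg hgt, h0]
        dsimp only
        rw [if_neg hr]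
        have hpos : 0 < nums.length := List.length_pos_of_ne_nil hn
        have hlast : PySem.List.pyGet? nums (-1) = some (getOp nums ((nums.length : Int) - 1)) := by
          have h1 : PySem.List.pyGet? nums (-1) = nums[nums.length - 1]? := by
            simpa using PySem.List.pyGet?_neg_natCast nums 1 (by omega) (by omega)
          have h2 : PySem.List.pyGet? nums ((nums.length : Int) - 1) = nums[nums.length - 1]? := by
            rw [PySem.List.pyGet?_of_nonneg nums (i := (nums.length : Int) - 1) (by omega)]
            congr 1
            omega
          have ha : nums[nums.length - 1]? = some nums[nums.length - 1] :=
            List.getElem?_eq_getElem (by omega)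
          rw [h1, ha, getOp, h2, ha]
          rfl
        -- the loop body equals the pure stepF over operand values, for k in the range
        have hbody : ((PySem.List.pyRange i ((nums.length : Int) - 1)).foldl
            (fun fr k =>
              fr.foldl
                (fun acc v =>
                  match PySem.List.pyGet? nums k with
                  | none => acc
                  | some x =>
                    let acc1 := if v + x ≤ nums.headI then PySem.Set.add acc (v + x) else acc
                    if v * x ≤ nums.headI then PySem.Set.add acc1 (v * x) else acc1)
                (PySem.Set.ofList []))
            (PySem.Set.ofList [res]))
            = ((PySem.List.pyRange i ((nums.length : Int) - 1)).map (getOp nums)).foldl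
                (fun fr x => stepF nums.headI x fr) (PySem.Set.ofList [res]) := by
          rw [List.foldl_map]
          apply PySem.List.foldl_congr_mem
          intro fr k hk
          rw [PySem.List.mem_pyRange_one] at hk
          rw [pyGet?_eq_some_getOp nums k (by omega) (by omega)]
          rfl
        rw [hbody]
        have hfr : (∀ v ∈ PySem.Set.ofList [res], v ≤ nums.headI) := by
          intro v hv
          rw [PySem.Set.mem_ofList] at hv
          simp at hv
          omega
        have := frontier_any nums.headI (getOp nums ((nums.length : Int) - 1))
          ((PySem.List.pyRange i ((nums.length : Int) - 1)).map (getOp nums))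
          (PySem.Set.ofList [res]) hfr
        simp only [hlast]
        rw [this]
        have hsplit : (PySem.List.pyRange i ((nums.length : Int) - 1)).map (getOp nums)
            ++ [getOp nums ((nums.length : Int) - 1)]
            = (PySem.List.pyRange i (nums.length : Int)).map (getOp nums) := by
          have hr2 : PySem.List.pyRange i (nums.length : Int)
              = PySem.List.pyRange i ((nums.length : Int) - 1) ++ [(nums.length : Int) - 1] := by
            simpa using PySem.List.pyRange_one_succ_right (a := i) (b := (nums.length : Int) - 1) (by omega)
          rw [hr2, List.map_append, List.map_cons, List.map_nil]
        rw [hsplit]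
        simp [PySem.Set.ofList]
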